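-- pv_equiv track=rewrite | github.com/nknezek/project_euler | p017_NumberLetterCounts.py | num2wd
-- ===== SOURCE A (Python) =====
-- nums = {1:'one', 2:'two', 3:'three', 4:'four', 5:'five', 6:'six', 7:'seven',
--         8:'eight', 9:'nine', 10:'ten', 20:'twenty', 30:'thirty', 40:'forty',
--         50:'fifty', 60:'sixty', 70:'seventy', 80:'eighty', 90:'ninety',
--         11:'eleven', 12:'twelve', 13:'thirteen', 14:'fourteen', 15:'fifteen',
--         16:'sixteen', 17:'seventeen', 18:'eighteen', 19:'nineteen'}
--
-- def num2wd(n):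
--     n = int(n)
--     if n>=10**6 or n<0:
--         raise Exception('number out of range 1 to 10^6-1')
--     if n>=1000:
--         return num2wd(n/1000)+' thousand '+num2wd(n%1000)
--     elif n>=100:
--         if n%100==0:
--             return num2wd(n/100)+' hundred'
--         else:
--             return num2wd(n/100)+' hundred and '+num2wd(n%100)
--     elif n>20:
--         return nums[n-n%10]+' '+num2wd(n%10)
--     elif n>0:
--         return nums[n]
--     elif n==0:
--         return ''
--     else:
--         raise Exception('number out of range 1 to 10^6-1')
-- ===== SOURCE B (Python) =====
-- nums = {1:'one', 2:'two', 3:'three', 4:'four', 5:'five', 6:'six', 7:'seven',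
--         8:'eight', 9:'nine', 10:'ten', 20:'twenty', 30:'thirty', 40:'forty',
--         50:'fifty', 60:'sixty', 70:'seventy', 80:'eighty', 90:'ninety',
--         11:'eleven', 12:'twelve', 13:'thirteen', 14:'fourteen', 15:'fifteen',
--         16:'sixteen', 17:'seventeen', 18:'eighteen', 19:'nineteen'}
--
-- def _under100(n):
--     # 0 <= n < 100; '' for 0; keeps A's trailing space on exact tens > 20
--     if n > 20:
--         return nums[n - n % 10] + ' ' + (nums[n % 10] if n % 10 else '')
--     return nums[n] if n else ''
--
-- def _under1000(n):
--     # 0 <= n < 1000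
--     if n >= 100:
--         h = nums[n // 100] + ' hundred'
--         return h if n % 100 == 0 else h + ' and ' + _under100(n % 100)
--     return _under100(n)
--
-- def num2wd(n):
--     n = int(n)
--     if n >= 10**6 or n < 0:
--         raise Exception('number out of range 1 to 10^6-1')
--     q, r = divmod(n, 1000)
--     if q:
--         return _under1000(q) + ' thousand ' + _under1000(r)
--     return _under1000(r)
-- ===== Notes on version B (the rewrite author's own statement) =====
-- stated objective: alternative
-- what changed: Replaced A's five-way self-recursion (which re-enters the full range-checked function even for digits) by a single top-level thousands split plus two small non-self-recursive helpers for values below 1000 and below 100.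
import Mathlib
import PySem

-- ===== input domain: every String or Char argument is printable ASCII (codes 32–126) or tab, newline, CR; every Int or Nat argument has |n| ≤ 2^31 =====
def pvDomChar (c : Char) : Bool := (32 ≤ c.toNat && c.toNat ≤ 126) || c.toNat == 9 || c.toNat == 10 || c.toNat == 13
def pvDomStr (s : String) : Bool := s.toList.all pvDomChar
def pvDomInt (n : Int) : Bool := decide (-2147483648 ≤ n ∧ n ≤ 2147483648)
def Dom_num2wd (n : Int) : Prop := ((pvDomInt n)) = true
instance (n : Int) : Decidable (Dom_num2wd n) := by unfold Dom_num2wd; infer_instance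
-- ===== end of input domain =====

-- B splits n once into thousands quotient/remainder and formats each with small
-- non-self-recursive helpers, instead of A's five-way self-recursion. Same cost; 'alternative'.

-- ===== PORT A =====
-- the module-level dict 'nums'; lookup nums[k] (KeyError is unreachable on the keys A uses inside Pre_)
def numsGet (k : Int) : String :=
  if k = 1 then "one" else if k = 2 then "two" else if k = 3 then "three"
  else if k = 4 then "four" else if k = 5 then "five" else if k = 6 then "six"
  else if k = 7 then "seven" else if k = 8 then "eight" else if k = 9 then "nine"
  else if k = 10 then "ten" else if k = 20 then "twenty" else if k = 30 then "thirty"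
  else if k = 40 then "forty" else if k = 50 then "fifty" else if k = 60 then "sixty"
  else if k = 70 then "seventy" else if k = 80 then "eighty" else if k = 90 then "ninety"
  else if k = 11 then "eleven" else if k = 12 then "twelve" else if k = 13 then "thirteen"
  else if k = 14 then "fourteen" else if k = 15 then "fifteen" else if k = 16 then "sixteen"
  else if k = 17 then "seventeen" else if k = 18 then "eighteen" else if k = 19 then "nineteen"
  else ""

-- A's recursion, fuelled (recursion depth is at most 4 on 0 ≤ n < 10^6, so fuel 5 never runs out
-- inside Pre_). Python's int(n/1000) / int(n/100) on this range equals floor division (the float is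
-- within 1e-10 of the exact ratio, whose fractional gaps are ≥ 1/1000), so they are ported exactly
-- as PySem.Int.floordiv. Where A raises, the port returns "" (excluded by Pre_).
def numA : Nat → Int → String
  | 0, _ => ""
  | fuel + 1, n =>
    if n ≥ 10 ^ 6 ∨ n < 0 then ""
    else if n ≥ 1000 then
      numA fuel (PySem.Int.floordiv n 1000) ++ " thousand " ++ numA fuel (PySem.Int.mod n 1000)
    else if n ≥ 100 then
      if PySem.Int.mod n 100 = 0 then numA fuel (PySem.Int.floordiv n 100) ++ " hundred"
      else numA fuel (PySem.Int.floordiv n 100) ++ " hundred and " ++ numA fuel (PySem.Int.mod n 100)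
    else if n > 20 then numsGet (n - PySem.Int.mod n 10) ++ " " ++ numA fuel (PySem.Int.mod n 10)
    else if n > 0 then numsGet n
    else if n = 0 then ""
    else ""

def num2wd (n : Int) : String := numA 5 n

-- ===== PORT B =====
-- _under100 from Source B: 0 ≤ n < 100
def under100 (n : Int) : String :=
  if n > 20 then
    numsGet (n - PySem.Int.mod n 10) ++ " " ++
      (if PySem.Int.mod n 10 ≠ 0 then numsGet (PySem.Int.mod n 10) else "")
  else if n ≠ 0 then numsGet n else ""

-- _under1000 from Source B: 0 ≤ n < 1000
def under1000 (n : Int) : String :=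
  if n ≥ 100 then
    let h := numsGet (PySem.Int.floordiv n 100) ++ " hundred"
    if PySem.Int.mod n 100 = 0 then h else h ++ " and " ++ under100 (PySem.Int.mod n 100)
  else under100 n

-- where B raises (same inputs as A), the port returns "" (excluded by Pre_)
def num2wd_alt (n : Int) : String :=
  if n ≥ 10 ^ 6 ∨ n < 0 then ""
  else
    let q := PySem.Int.floordiv n 1000
    let r := PySem.Int.mod n 1000
    if q ≠ 0 then under1000 q ++ " thousand " ++ under1000 r
    else under1000 r

-- ===== PRECONDITION & SPEC =====
-- exactly the inputs on which A returns (it raises for n < 0 or n ≥ 10^6)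
def Pre_num2wd (n : Int) : Prop := 0 ≤ n ∧ n < 10 ^ 6
instance (n : Int) : Decidable (Pre_num2wd n) := by unfold Pre_num2wd; infer_instance

def pvWitness_num2wd : Int := (123456)

def Spec_num2wd (n : Int) (out : String) : Prop := out = num2wd_alt n
instance (n : Int) (out : String) : Decidable (Spec_num2wd n out) := by unfold Spec_num2wd; infer_instance

-- ===== CLAIM (what is proved, stated in full; the proofs are below) =====
def Claim_equal_num2wd : Prop := ∀ (n : Int), Dom_num2wd n → Pre_num2wd n → Spec_num2wd n (num2wd n)

-- ===== LEMMAS AND PROOFS =====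

-- one-step unfolding of A's fuelled recursion (rfl; keeps rewriting from unfolding every fuel level)
theorem numA_succ (f : Nat) (n : Int) : numA (f + 1) n =
    (if n ≥ 10 ^ 6 ∨ n < 0 then ""
    else if n ≥ 1000 then
      numA f (PySem.Int.floordiv n 1000) ++ " thousand " ++ numA f (PySem.Int.mod n 1000)
    else if n ≥ 100 then
      if PySem.Int.mod n 100 = 0 then numA f (PySem.Int.floordiv n 100) ++ " hundred"
      else numA f (PySem.Int.floordiv n 100) ++ " hundred and " ++ numA f (PySem.Int.mod n 100)
    else if n > 20 then numsGet (n - PySem.Int.mod n 10) ++ " " ++ numA f (PySem.Int.mod n 10)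
    else if n > 0 then numsGet n
    else if n = 0 then ""
    else "") := rfl

theorem numA_small (f : Nat) (n : Int) (h0 : 0 ≤ n) (h1 : n ≤ 20) :
    numA (f + 1) n = if n ≠ 0 then numsGet n else "" := by
  rw [numA_succ, if_neg (by omega : ¬(n ≥ 10 ^ 6 ∨ n < 0)), if_neg (by omega : ¬ n ≥ 1000),
      if_neg (by omega : ¬ n ≥ 100), if_neg (by omega : ¬ n > 20)]
  split_ifs <;> first | rfl | omega

theorem numA_100 (f : Nat) (n : Int) (h0 : 0 ≤ n) (h1 : n < 100) :
    numA (f + 2) n = under100 n := by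
  have hm0 := PySem.Int.mod_nonneg n (show (0:Int) < 10 by norm_num)
  have hm1 := PySem.Int.mod_lt n (show (0:Int) < 10 by norm_num)
  rw [show numA (f + 2) n = numA ((f + 1) + 1) n from rfl, numA_succ,
      if_neg (by omega : ¬(n ≥ 10 ^ 6 ∨ n < 0)), if_neg (by omega : ¬ n ≥ 1000),
      if_neg (by omega : ¬ n ≥ 100)]
  unfold under100
  by_cases h20 : n > 20
  · rw [if_pos h20, if_pos h20, numA_small f _ hm0 (by omega)]
  · rw [if_neg h20, if_neg h20]
    split_ifs <;> first | rfl | omega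

theorem numA_1000 (f : Nat) (n : Int) (h0 : 0 ≤ n) (h1 : n < 1000) :
    numA (f + 3) n = under1000 n := by
  by_cases h100 : n ≥ 100
  · have hd1 : 1 ≤ PySem.Int.floordiv n 100 := by
      rw [PySem.Int.le_floordiv_iff_mul_le (by norm_num)]; omega
    have hd2 : PySem.Int.floordiv n 100 < 10 := by
      rw [PySem.Int.floordiv_lt_iff_lt_mul (by norm_num)]; omega
    have hm0 := PySem.Int.mod_nonneg n (show (0:Int) < 100 by norm_num)
    have hm1 := PySem.Int.mod_lt n (show (0:Int) < 100 by norm_num)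
    rw [show numA (f + 3) n = numA ((f + 2) + 1) n from rfl, numA_succ,
        if_neg (by omega : ¬(n ≥ 10 ^ 6 ∨ n < 0)), if_neg (by omega : ¬ n ≥ 1000), if_pos h100]
    unfold under1000
    rw [if_pos h100]
    by_cases hz : PySem.Int.mod n 100 = 0
    · rw [if_pos hz, if_pos hz,
          show numA (f + 2) (PySem.Int.floordiv n 100) = numA ((f + 1) + 1) _ from rfl,
          numA_small (f + 1) _ (by omega) (by omega), if_pos (by omega : PySem.Int.floordiv n 100 ≠ 0)]
    · rw [if_neg hz, if_neg hz,
          show numA (f + 2) (PySem.Int.floordiv n 100) = numA ((f + 1) + 1) _ from rfl,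
          numA_small (f + 1) _ (by omega) (by omega), if_pos (by omega : PySem.Int.floordiv n 100 ≠ 0),
          numA_100 f _ hm0 hm1]
      congr 1
      rw [String.append_assoc]
      rfl
  · rw [show numA (f + 3) n = numA ((f + 1) + 2) n from rfl, numA_100 (f + 1) n h0 (by omega)]
    unfold under1000
    rw [if_neg h100]

-- ===== VERDICT (by name: the statement is the Claim_ definition above) =====
theorem num2wd_spec : Claim_equal_num2wd := by
  intro n _ hpre
  obtain ⟨h0, h1⟩ := hpre
  have hnr : ¬(n ≥ 10 ^ 6 ∨ n < 0) := by omega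
  unfold Spec_num2wd num2wd
  simp only [num2wd_alt, if_neg hnr]
  by_cases h1000 : n ≥ 1000
  · have hq1 : 1 ≤ PySem.Int.floordiv n 1000 := by
      rw [PySem.Int.le_floordiv_iff_mul_le (by norm_num)]; omega
    have hq2 : PySem.Int.floordiv n 1000 < 1000 := by
      rw [PySem.Int.floordiv_lt_iff_lt_mul (by norm_num)]; omega
    have hm0 := PySem.Int.mod_nonneg n (show (0:Int) < 1000 by norm_num)
    have hm1 := PySem.Int.mod_lt n (show (0:Int) < 1000 by norm_num)
    rw [show numA 5 n = numA (4 + 1) n from rfl, numA_succ, if_neg hnr, if_pos h1000,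
        show numA 4 (PySem.Int.floordiv n 1000) = numA (1 + 3) _ from rfl,
        numA_1000 1 _ (by omega) hq2,
        show numA 4 (PySem.Int.mod n 1000) = numA (1 + 3) _ from rfl,
        numA_1000 1 _ hm0 hm1,
        if_pos (by omega : PySem.Int.floordiv n 1000 ≠ 0)]
  · have hq : PySem.Int.floordiv n 1000 = 0 := by
      rw [PySem.Int.floordiv_eq_iff_of_pos (by norm_num)]; omega
    have hr : PySem.Int.mod n 1000 = n := by
      have := PySem.Int.floordiv_mul_add_mod n 1000
      omega
    rw [hq, if_neg (by simp : ¬ (0 : Int) ≠ 0), hr,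
        show numA 5 n = numA (2 + 3) n from rfl, numA_1000 2 n h0 (by omega)]
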